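-- pv_equiv track=rewrite | github.com/andrei399/codewars-solutions | carmilagenumber.py | incremental
-- ===== SOURCE A (Python) =====
-- def incremental(n):
--     last = n % 10
--     n //= 10
--     if last == 0 and n % 10 == 9:
--         n //= 10
--         last = 9
--     while n:
--         if n % 10 + 1 != last: return False
--         last = n % 10
--         n //= 10
--     return True
-- ===== SOURCE B (Python) =====
-- def incremental(n):
--     return str(n) in "1234567890"
-- ===== Notes on version B (the rewrite author's own statement) =====
-- stated objective: simpler
-- what changed: Replaces the digit-by-digit modulo/floor-division scan (with a special-cased trailing 9->0 wrap) by a single closed-form membership test: n is accepted iff its decimal string is a contiguous substring of "1234567890".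
import Mathlib
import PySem

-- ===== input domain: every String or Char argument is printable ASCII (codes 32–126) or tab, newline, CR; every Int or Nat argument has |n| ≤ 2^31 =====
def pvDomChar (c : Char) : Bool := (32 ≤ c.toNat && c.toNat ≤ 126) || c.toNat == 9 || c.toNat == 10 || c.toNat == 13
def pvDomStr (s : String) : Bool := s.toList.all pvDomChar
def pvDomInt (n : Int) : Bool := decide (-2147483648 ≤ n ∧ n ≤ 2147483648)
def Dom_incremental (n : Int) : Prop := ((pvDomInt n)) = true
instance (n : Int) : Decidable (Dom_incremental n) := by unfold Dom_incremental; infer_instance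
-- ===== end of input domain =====

-- B replaces A's digit-by-digit mod/floordiv scan (with its special-cased trailing 9->0 wrap)
-- by a closed-form test: str(n) must be a contiguous substring of "1234567890" (objective: simpler).

-- ===== PORT A =====
-- the `while n:` loop of A, carrying Python's `last` and the remaining `n`
def incLoop (last : Int) (n : Int) : Bool :=
  if n = 0 then true
  else if PySem.Int.mod n 10 + 1 ≠ last then false
  else incLoop (PySem.Int.mod n 10) (PySem.Int.floordiv n 10)
termination_by 2 * n.natAbs + (if last = 10 then 1 else 0)
decreasing_by
  rename_i hn hlast
  have e := PySem.Int.floordiv_mul_add_mod n 10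
  have h1 := PySem.Int.mod_nonneg n (b := 10) (by norm_num)
  have h2 := PySem.Int.mod_lt n (b := 10) (by norm_num)
  rw [if_neg (by omega : ¬ PySem.Int.mod n 10 = 10)]
  by_cases hl : last = 10
  · rw [if_pos hl]; omega
  · rw [if_neg hl]; omega

def incremental (n : Int) : Bool :=
  let last := PySem.Int.mod n 10
  let n1 := PySem.Int.floordiv n 10
  if last = 0 ∧ PySem.Int.mod n1 10 = 9 then
    incLoop 9 (PySem.Int.floordiv n1 10)
  else incLoop last n1

-- ===== PORT B =====
def incremental_alt (n : Int) : Bool :=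
  PySem.Str.isIn (PySem.Int.toStr n) "1234567890"

-- ===== PRECONDITION & SPEC =====
def Spec_incremental (n : Int) (out : Bool) : Prop := out = incremental_alt n
instance (n : Int) (out : Bool) : Decidable (Spec_incremental n out) := by unfold Spec_incremental; infer_instance

-- ===== CLAIM (what is proved, stated in full; the proofs are below) =====
def Claim_equal_incremental : Prop := ∀ (n : Int), Dom_incremental n → Spec_incremental n (incremental n)

-- ===== LEMMAS AND PROOFS =====

-- the values both programs accept: the contiguous substrings of "1234567890" read as integers
def S : List Int := [0, 1, 2, 3, 4, 5, 6, 7, 8, 9, 12, 23, 34, 45, 56, 67, 78, 89, 90, 123, 234, 345, 456, 567, 678, 789, 890, 1234, 2345, 3456, 4567, 5678, 6789, 7890, 12345, 23456, 34567, 45678, 56789, 67890, 123456, 234567, 345678, 456789, 567890, 1234567, 2345678, 3456789, 4567890, 12345678, 23456789, 34567890, 123456789, 234567890, 1234567890]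

-- P k = the values of the remaining `n` from which `incLoop k n` returns True
def P : Nat → List Int
  | 0 => [0]
  | k + 1 => 0 :: (P k).map (fun p => 10 * p + (k : Int))

lemma incLoop_char (k : Nat) (hk : k < 10) : ∀ n : Int, (incLoop (k : Int) n = true ↔ n ∈ P k) := by
  induction k with
  | zero =>
    intro n
    have h1 := PySem.Int.mod_nonneg n (b := 10) (by norm_num)
    rw [incLoop.eq_def]
    split_ifs with hz hc
    · simp [P, hz]
    · simp only [P, List.mem_cons, List.not_mem_nil, or_false, false_iff]
      exact hz
    · exfalso; push_cast at hc; omega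
  | succ k ih =>
    intro n
    have e1 := PySem.Int.floordiv_mul_add_mod n 10
    have h1 := PySem.Int.mod_nonneg n (b := 10) (by norm_num)
    have h2 := PySem.Int.mod_lt n (b := 10) (by norm_num)
    rw [incLoop.eq_def]
    split_ifs with hz hc
    · simp [P, hz]
    · simp only [P, List.mem_cons, List.mem_map, false_iff]
      push_cast at hc
      rintro (rfl | ⟨p, hp, hpe⟩)
      · exact hz rfl
      · omega
    · push_cast at hc
      have hmk : PySem.Int.mod n 10 = (k : Int) := by omega
      rw [hmk, ih (by omega)]
      simp only [P, List.mem_cons, List.mem_map]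
      constructor
      · intro hp; exact Or.inr ⟨PySem.Int.floordiv n 10, hp, by omega⟩
      · rintro (rfl | ⟨p, hp, hpe⟩)
        · exact absurd rfl hz
        · have hfd : PySem.Int.floordiv n 10 = p := by omega
          rwa [hfd]

set_option maxHeartbeats 1000000 in
lemma A_char (n : Int) : incremental n = true ↔ n ∈ S := by
  have e1 := PySem.Int.floordiv_mul_add_mod n 10
  have h1 := PySem.Int.mod_nonneg n (b := 10) (by norm_num)
  have h2 := PySem.Int.mod_lt n (b := 10) (by norm_num)
  have e2 := PySem.Int.floordiv_mul_add_mod (PySem.Int.floordiv n 10) 10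
  have h3 := PySem.Int.mod_nonneg (PySem.Int.floordiv n 10) (b := 10) (by norm_num)
  have h4 := PySem.Int.mod_lt (PySem.Int.floordiv n 10) (b := 10) (by norm_num)
  simp only [incremental]
  split_ifs with hw
  · have hc := incLoop_char 9 (by norm_num) (PySem.Int.floordiv (PySem.Int.floordiv n 10) 10)
    rw [show (((9 : Nat)) : Int) = (9 : Int) from rfl] at hc
    rw [hc]
    constructor
    · intro h
      simp only [(by decide : P 9 = ([0, 8, 78, 678, 5678, 45678, 345678, 2345678, 12345678, 12345678] : List Int)), List.mem_cons,
        List.not_mem_nil, or_false] at h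
      rcases h with h | h | h | h | h | h | h | h | h | h
      · have hn : n = 90 := by omega
        subst hn
        decide
      · have hn : n = 890 := by omega
        subst hn
        decide
      · have hn : n = 7890 := by omega
        subst hn
        decide
      · have hn : n = 67890 := by omega
        subst hn
        decide
      · have hn : n = 567890 := by omega
        subst hn
        decide
      · have hn : n = 4567890 := by omega
        subst hn
        decide
      · have hn : n = 34567890 := by omega
        subst hn
        decide
      · have hn : n = 234567890 := by omega
        subst hn
        decide
      · have hn : n = 1234567890 := by omega
        subst hn
        decide
      · have hn : n = 1234567890 := by omega
        subst hn
        decide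
    · intro h
      obtain rfl | rfl | rfl | rfl | rfl | rfl | rfl | rfl | rfl | rfl | rfl | rfl | rfl | rfl | rfl | rfl | rfl | rfl | rfl | rfl | rfl | rfl | rfl | rfl | rfl | rfl | rfl | rfl | rfl | rfl | rfl | rfl | rfl | rfl | rfl | rfl | rfl | rfl | rfl | rfl | rfl | rfl | rfl | rfl | rfl | rfl | rfl | rfl | rfl | rfl | rfl | rfl | rfl | rfl | rfl := by
          simpa only [S, List.mem_cons, List.not_mem_nil, or_false] using h
      all_goals simp only [(by decide : P 9 = ([0, 8, 78, 678, 5678, 45678, 345678, 2345678, 12345678, 12345678] : List Int)), List.mem_cons,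
        List.not_mem_nil, or_false]
      all_goals omega
  · have hk : (((PySem.Int.mod n 10).toNat : Nat) : Int) = PySem.Int.mod n 10 :=
      Int.toNat_of_nonneg h1
    rw [← hk, incLoop_char (PySem.Int.mod n 10).toNat (by omega)]
    obtain ⟨m, hmv⟩ : ∃ m : Nat, (PySem.Int.mod n 10).toNat = m := ⟨_, rfl⟩
    have hm10 : m < 10 := by omega
    have hmi : (m : Int) = PySem.Int.mod n 10 := by omega
    rw [hmv]
    interval_cases m
    · constructor
      · intro h
        simp only [(by decide : P 0 = ([0] : List Int)), List.mem_cons,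
          List.not_mem_nil, or_false] at h
        rcases h with h
        · have hn : n = 0 := by omega
          subst hn
          decide
      · intro h
        obtain rfl | rfl | rfl | rfl | rfl | rfl | rfl | rfl | rfl | rfl | rfl | rfl | rfl | rfl | rfl | rfl | rfl | rfl | rfl | rfl | rfl | rfl | rfl | rfl | rfl | rfl | rfl | rfl | rfl | rfl | rfl | rfl | rfl | rfl | rfl | rfl | rfl | rfl | rfl | rfl | rfl | rfl | rfl | rfl | rfl | rfl | rfl | rfl | rfl | rfl | rfl | rfl | rfl | rfl | rfl := by
            simpa only [S, List.mem_cons, List.not_mem_nil, or_false] using h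
        all_goals simp only [(by decide : P 0 = ([0] : List Int)), List.mem_cons,
          List.not_mem_nil, or_false]
        all_goals omega
    · constructor
      · intro h
        simp only [(by decide : P 1 = ([0, 0] : List Int)), List.mem_cons,
          List.not_mem_nil, or_false] at h
        rcases h with h | h
        · have hn : n = 1 := by omega
          subst hn
          decide
        · have hn : n = 1 := by omega
          subst hn
          decide
      · intro h
        obtain rfl | rfl | rfl | rfl | rfl | rfl | rfl | rfl | rfl | rfl | rfl | rfl | rfl | rfl | rfl | rfl | rfl | rfl | rfl | rfl | rfl | rfl | rfl | rfl | rfl | rfl | rfl | rfl | rfl | rfl | rfl | rfl | rfl | rfl | rfl | rfl | rfl | rfl | rfl | rfl | rfl | rfl | rfl | rfl | rfl | rfl | rfl | rfl | rfl | rfl | rfl | rfl | rfl | rfl | rfl := by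
            simpa only [S, List.mem_cons, List.not_mem_nil, or_false] using h
        all_goals simp only [(by decide : P 1 = ([0, 0] : List Int)), List.mem_cons,
          List.not_mem_nil, or_false]
        all_goals omega
    · constructor
      · intro h
        simp only [(by decide : P 2 = ([0, 1, 1] : List Int)), List.mem_cons,
          List.not_mem_nil, or_false] at h
        rcases h with h | h | h
        · have hn : n = 2 := by omega
          subst hn
          decide
        · have hn : n = 12 := by omega
          subst hn
          decide
        · have hn : n = 12 := by omega
          subst hn
          decide
      · intro h
        obtain rfl | rfl | rfl | rfl | rfl | rfl | rfl | rfl | rfl | rfl | rfl | rfl | rfl | rfl | rfl | rfl | rfl | rfl | rfl | rfl | rfl | rfl | rfl | rfl | rfl | rfl | rfl | rfl | rfl | rfl | rfl | rfl | rfl | rfl | rfl | rfl | rfl | rfl | rfl | rfl | rfl | rfl | rfl | rfl | rfl | rfl | rfl | rfl | rfl | rfl | rfl | rfl | rfl | rfl | rfl := by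
            simpa only [S, List.mem_cons, List.not_mem_nil, or_false] using h
        all_goals simp only [(by decide : P 2 = ([0, 1, 1] : List Int)), List.mem_cons,
          List.not_mem_nil, or_false]
        all_goals omega
    · constructor
      · intro h
        simp only [(by decide : P 3 = ([0, 2, 12, 12] : List Int)), List.mem_cons,
          List.not_mem_nil, or_false] at h
        rcases h with h | h | h | h
        · have hn : n = 3 := by omega
          subst hn
          decide
        · have hn : n = 23 := by omega
          subst hn
          decide
        · have hn : n = 123 := by omega
          subst hn
          decide
        · have hn : n = 123 := by omega
          subst hn
          decide
      · intro h
        obtain rfl | rfl | rfl | rfl | rfl | rfl | rfl | rfl | rfl | rfl | rfl | rfl | rfl | rfl | rfl | rfl | rfl | rfl | rfl | rfl | rfl | rfl | rfl | rfl | rfl | rfl | rfl | rfl | rfl | rfl | rfl | rfl | rfl | rfl | rfl | rfl | rfl | rfl | rfl | rfl | rfl | rfl | rfl | rfl | rfl | rfl | rfl | rfl | rfl | rfl | rfl | rfl | rfl | rfl | rfl := by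
            simpa only [S, List.mem_cons, List.not_mem_nil, or_false] using h
        all_goals simp only [(by decide : P 3 = ([0, 2, 12, 12] : List Int)), List.mem_cons,
          List.not_mem_nil, or_false]
        all_goals omega
    · constructor
      · intro h
        simp only [(by decide : P 4 = ([0, 3, 23, 123, 123] : List Int)), List.mem_cons,
          List.not_mem_nil, or_false] at h
        rcases h with h | h | h | h | h
        · have hn : n = 4 := by omega
          subst hn
          decide
        · have hn : n = 34 := by omega
          subst hn
          decide
        · have hn : n = 234 := by omega
          subst hn
          decide
        · have hn : n = 1234 := by omega
          subst hn
          decide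
        · have hn : n = 1234 := by omega
          subst hn
          decide
      · intro h
        obtain rfl | rfl | rfl | rfl | rfl | rfl | rfl | rfl | rfl | rfl | rfl | rfl | rfl | rfl | rfl | rfl | rfl | rfl | rfl | rfl | rfl | rfl | rfl | rfl | rfl | rfl | rfl | rfl | rfl | rfl | rfl | rfl | rfl | rfl | rfl | rfl | rfl | rfl | rfl | rfl | rfl | rfl | rfl | rfl | rfl | rfl | rfl | rfl | rfl | rfl | rfl | rfl | rfl | rfl | rfl := by
            simpa only [S, List.mem_cons, List.not_mem_nil, or_false] using h
        all_goals simp only [(by decide : P 4 = ([0, 3, 23, 123, 123] : List Int)), List.mem_cons,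
          List.not_mem_nil, or_false]
        all_goals omega
    · constructor
      · intro h
        simp only [(by decide : P 5 = ([0, 4, 34, 234, 1234, 1234] : List Int)), List.mem_cons,
          List.not_mem_nil, or_false] at h
        rcases h with h | h | h | h | h | h
        · have hn : n = 5 := by omega
          subst hn
          decide
        · have hn : n = 45 := by omega
          subst hn
          decide
        · have hn : n = 345 := by omega
          subst hn
          decide
        · have hn : n = 2345 := by omega
          subst hn
          decide
        · have hn : n = 12345 := by omega
          subst hn
          decide
        · have hn : n = 12345 := by omega
          subst hn
          decide
      · intro h
        obtain rfl | rfl | rfl | rfl | rfl | rfl | rfl | rfl | rfl | rfl | rfl | rfl | rfl | rfl | rfl | rfl | rfl | rfl | rfl | rfl | rfl | rfl | rfl | rfl | rfl | rfl | rfl | rfl | rfl | rfl | rfl | rfl | rfl | rfl | rfl | rfl | rfl | rfl | rfl | rfl | rfl | rfl | rfl | rfl | rfl | rfl | rfl | rfl | rfl | rfl | rfl | rfl | rfl | rfl | rfl := by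
            simpa only [S, List.mem_cons, List.not_mem_nil, or_false] using h
        all_goals simp only [(by decide : P 5 = ([0, 4, 34, 234, 1234, 1234] : List Int)), List.mem_cons,
          List.not_mem_nil, or_false]
        all_goals omega
    · constructor
      · intro h
        simp only [(by decide : P 6 = ([0, 5, 45, 345, 2345, 12345, 12345] : List Int)), List.mem_cons,
          List.not_mem_nil, or_false] at h
        rcases h with h | h | h | h | h | h | h
        · have hn : n = 6 := by omega
          subst hn
          decide
        · have hn : n = 56 := by omega
          subst hn
          decide
        · have hn : n = 456 := by omega
          subst hn
          decide
        · have hn : n = 3456 := by omega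
          subst hn
          decide
        · have hn : n = 23456 := by omega
          subst hn
          decide
        · have hn : n = 123456 := by omega
          subst hn
          decide
        · have hn : n = 123456 := by omega
          subst hn
          decide
      · intro h
        obtain rfl | rfl | rfl | rfl | rfl | rfl | rfl | rfl | rfl | rfl | rfl | rfl | rfl | rfl | rfl | rfl | rfl | rfl | rfl | rfl | rfl | rfl | rfl | rfl | rfl | rfl | rfl | rfl | rfl | rfl | rfl | rfl | rfl | rfl | rfl | rfl | rfl | rfl | rfl | rfl | rfl | rfl | rfl | rfl | rfl | rfl | rfl | rfl | rfl | rfl | rfl | rfl | rfl | rfl | rfl := by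
            simpa only [S, List.mem_cons, List.not_mem_nil, or_false] using h
        all_goals simp only [(by decide : P 6 = ([0, 5, 45, 345, 2345, 12345, 12345] : List Int)), List.mem_cons,
          List.not_mem_nil, or_false]
        all_goals omega
    · constructor
      · intro h
        simp only [(by decide : P 7 = ([0, 6, 56, 456, 3456, 23456, 123456, 123456] : List Int)), List.mem_cons,
          List.not_mem_nil, or_false] at h
        rcases h with h | h | h | h | h | h | h | h
        · have hn : n = 7 := by omega
          subst hn
          decide
        · have hn : n = 67 := by omega
          subst hn
          decide
        · have hn : n = 567 := by omega
          subst hn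
          decide
        · have hn : n = 4567 := by omega
          subst hn
          decide
        · have hn : n = 34567 := by omega
          subst hn
          decide
        · have hn : n = 234567 := by omega
          subst hn
          decide
        · have hn : n = 1234567 := by omega
          subst hn
          decide
        · have hn : n = 1234567 := by omega
          subst hn
          decide
      · intro h
        obtain rfl | rfl | rfl | rfl | rfl | rfl | rfl | rfl | rfl | rfl | rfl | rfl | rfl | rfl | rfl | rfl | rfl | rfl | rfl | rfl | rfl | rfl | rfl | rfl | rfl | rfl | rfl | rfl | rfl | rfl | rfl | rfl | rfl | rfl | rfl | rfl | rfl | rfl | rfl | rfl | rfl | rfl | rfl | rfl | rfl | rfl | rfl | rfl | rfl | rfl | rfl | rfl | rfl | rfl | rfl := by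
            simpa only [S, List.mem_cons, List.not_mem_nil, or_false] using h
        all_goals simp only [(by decide : P 7 = ([0, 6, 56, 456, 3456, 23456, 123456, 123456] : List Int)), List.mem_cons,
          List.not_mem_nil, or_false]
        all_goals omega
    · constructor
      · intro h
        simp only [(by decide : P 8 = ([0, 7, 67, 567, 4567, 34567, 234567, 1234567, 1234567] : List Int)), List.mem_cons,
          List.not_mem_nil, or_false] at h
        rcases h with h | h | h | h | h | h | h | h | h
        · have hn : n = 8 := by omega
          subst hn
          decide
        · have hn : n = 78 := by omega
          subst hn
          decide
        · have hn : n = 678 := by omega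
          subst hn
          decide
        · have hn : n = 5678 := by omega
          subst hn
          decide
        · have hn : n = 45678 := by omega
          subst hn
          decide
        · have hn : n = 345678 := by omega
          subst hn
          decide
        · have hn : n = 2345678 := by omega
          subst hn
          decide
        · have hn : n = 12345678 := by omega
          subst hn
          decide
        · have hn : n = 12345678 := by omega
          subst hn
          decide
      · intro h
        obtain rfl | rfl | rfl | rfl | rfl | rfl | rfl | rfl | rfl | rfl | rfl | rfl | rfl | rfl | rfl | rfl | rfl | rfl | rfl | rfl | rfl | rfl | rfl | rfl | rfl | rfl | rfl | rfl | rfl | rfl | rfl | rfl | rfl | rfl | rfl | rfl | rfl | rfl | rfl | rfl | rfl | rfl | rfl | rfl | rfl | rfl | rfl | rfl | rfl | rfl | rfl | rfl | rfl | rfl | rfl := by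
            simpa only [S, List.mem_cons, List.not_mem_nil, or_false] using h
        all_goals simp only [(by decide : P 8 = ([0, 7, 67, 567, 4567, 34567, 234567, 1234567, 1234567] : List Int)), List.mem_cons,
          List.not_mem_nil, or_false]
        all_goals omega
    · constructor
      · intro h
        simp only [(by decide : P 9 = ([0, 8, 78, 678, 5678, 45678, 345678, 2345678, 12345678, 12345678] : List Int)), List.mem_cons,
          List.not_mem_nil, or_false] at h
        rcases h with h | h | h | h | h | h | h | h | h | h
        · have hn : n = 9 := by omega
          subst hn
          decide
        · have hn : n = 89 := by omega
          subst hn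
          decide
        · have hn : n = 789 := by omega
          subst hn
          decide
        · have hn : n = 6789 := by omega
          subst hn
          decide
        · have hn : n = 56789 := by omega
          subst hn
          decide
        · have hn : n = 456789 := by omega
          subst hn
          decide
        · have hn : n = 3456789 := by omega
          subst hn
          decide
        · have hn : n = 23456789 := by omega
          subst hn
          decide
        · have hn : n = 123456789 := by omega
          subst hn
          decide
        · have hn : n = 123456789 := by omega
          subst hn
          decide
      · intro h
        obtain rfl | rfl | rfl | rfl | rfl | rfl | rfl | rfl | rfl | rfl | rfl | rfl | rfl | rfl | rfl | rfl | rfl | rfl | rfl | rfl | rfl | rfl | rfl | rfl | rfl | rfl | rfl | rfl | rfl | rfl | rfl | rfl | rfl | rfl | rfl | rfl | rfl | rfl | rfl | rfl | rfl | rfl | rfl | rfl | rfl | rfl | rfl | rfl | rfl | rfl | rfl | rfl | rfl | rfl | rfl := by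
            simpa only [S, List.mem_cons, List.not_mem_nil, or_false] using h
        all_goals simp only [(by decide : P 9 = ([0, 8, 78, 678, 5678, 45678, 345678, 2345678, 12345678, 12345678] : List Int)), List.mem_cons,
          List.not_mem_nil, or_false]
        all_goals omega

-- ---- B side ----

lemma digitChar_inj (x y : Nat) (hx : x < 10) (hy : y < 10) :
    Nat.digitChar x = Nat.digitChar y → x = y := by
  interval_cases x <;> interval_cases y <;> decide

lemma digitChar_ne_dash (x : Nat) (hx : x < 10) : Nat.digitChar x ≠ '-' := by
  interval_cases x <;> decide

lemma map_digitChar_inj : ∀ (l1 l2 : List Nat), (∀ x ∈ l1, x < 10) → (∀ x ∈ l2, x < 10) →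
    l1.map Nat.digitChar = l2.map Nat.digitChar → l1 = l2 := by
  intro l1
  induction l1 with
  | nil => intro l2 _ _ h; cases l2 <;> simp_all
  | cons x l1 ih =>
    intro l2 hb1 hb2 h
    cases l2 with
    | nil => simp_all
    | cons y l2 =>
      simp only [List.map_cons, List.cons.injEq] at h
      have hxy : x = y := digitChar_inj x y (hb1 x (by simp)) (hb2 y (by simp)) h.1
      have := ih l2 (fun a ha => hb1 a (by simp [ha])) (fun a ha => hb2 a (by simp [ha])) h.2
      simp [hxy, this]

lemma toDigitsCore_repr : ∀ (f m : Nat) (l : List Char), 0 < f → m < 10 ^ f →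
    Nat.toDigitsCore 10 f m l =
      (if m = 0 then ['0'] else ((Nat.digits 10 m).map Nat.digitChar).reverse) ++ l := by
  intro f
  induction f with
  | zero => intro m l hf _; omega
  | succ f ih =>
    intro m l _ hm
    rw [Nat.toDigitsCore]
    by_cases h10 : m / 10 = 0
    · rw [if_pos h10]
      by_cases hm0 : m = 0
      · subst hm0; simp [show Nat.digitChar 0 = '0' from by decide]
      · have hlt : m < 10 := by omega
        rw [if_neg hm0, Nat.digits_def' (by norm_num : (1:Nat) < 10) (by omega : 0 < m)]
        rw [h10, Nat.digits_zero]
        have : m % 10 = m := Nat.mod_eq_of_lt hlt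
        simp [this]
    · rw [if_neg h10]
      have hf : 0 < f := by
        by_contra hc
        have : f = 0 := by omega
        subst this
        simp at hm
        omega
      have hdiv : m / 10 < 10 ^ f := by
        have hp : (10 : ℕ) ^ (f + 1) = 10 ^ f * 10 := pow_succ 10 f
        omega
      rw [ih (m / 10) _ hf hdiv, if_neg h10]
      have hm0 : ¬ m = 0 := by omega
      rw [if_neg hm0]
      rw [Nat.digits_def' (by norm_num : (1:Nat) < 10) (by omega : 0 < m)]
      simp

lemma toDigits_repr (m : Nat) : Nat.toDigits 10 m =
    (if m = 0 then ['0'] else ((Nat.digits 10 m).map Nat.digitChar).reverse) := by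
  have hlt : m < 10 ^ (m + 1) := by
    calc m < 10 ^ m := Nat.lt_pow_self (by norm_num)
    _ ≤ 10 ^ (m + 1) := Nat.pow_le_pow_right (by norm_num) (by omega)
  have := toDigitsCore_repr (m + 1) m [] (by omega) hlt
  rw [Nat.toDigits] at *
  simpa using this

lemma toDigits_inj (a b : Nat) (h : Nat.toDigits 10 a = Nat.toDigits 10 b) : a = b := by
  rw [toDigits_repr, toDigits_repr] at h
  have inv : ∀ c : Nat, c ≠ 0 → ¬ (['0'] = ((Nat.digits 10 c).map Nat.digitChar).reverse) := by
    intro c hc hcontra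
    have h1 : (Nat.digits 10 c).map Nat.digitChar = ['0'] := by
      have := congrArg List.reverse hcontra
      simpa using this.symm
    rcases hd : Nat.digits 10 c with _ | ⟨x, xs⟩
    · rw [hd] at h1; simp at h1
    · rw [hd] at h1
      simp only [List.map_cons, List.cons.injEq] at h1
      have hxs : xs = [] := List.map_eq_nil_iff.mp h1.2
      have hx10 : x < 10 := Nat.digits_lt_base (by norm_num) (by rw [hd]; simp)
      have hx0 : x = 0 := digitChar_inj x 0 hx10 (by norm_num) (by simpa using h1.1)
      have := Nat.ofDigits_digits 10 c
      rw [hd, hxs, hx0] at this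
      rw [show Nat.ofDigits 10 ([0] : List ℕ) = 0 from by decide] at this
      omega
  split_ifs at h with h1 h2 h2
  · omega
  · exact absurd h (inv b h2)
  · exact absurd h.symm (inv a h1)
  · have hmap : (Nat.digits 10 a).map Nat.digitChar = (Nat.digits 10 b).map Nat.digitChar := by
      have := congrArg List.reverse h
      simpa using this
    have hdig := map_digitChar_inj _ _
      (fun x hx => Nat.digits_lt_base (by norm_num) hx)
      (fun x hx => Nat.digits_lt_base (by norm_num) hx) hmap
    have ha := Nat.ofDigits_digits 10 a
    have hb := Nat.ofDigits_digits 10 b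
    rw [hdig, hb] at ha
    exact ha.symm

lemma toChars_inv (n v : Int) (hv : 0 ≤ v) (h : PySem.Int.toChars n = PySem.Int.toChars v) :
    n = v := by
  have hvc : PySem.Int.toChars v = Nat.toDigits 10 v.toNat := by
    simp [PySem.Int.toChars, not_lt.mpr hv]
  by_cases hn : n < 0
  · exfalso
    have hnc : PySem.Int.toChars n = '-' :: Nat.toDigits 10 n.natAbs := by
      simp [PySem.Int.toChars, hn]
    have hdash : '-' ∈ PySem.Int.toChars v := by
      rw [← h, hnc]; simp
    rw [hvc, toDigits_repr] at hdash
    split_ifs at hdash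
    · simp at hdash
    · rw [List.mem_reverse] at hdash
      obtain ⟨x, hx, hxc⟩ := List.mem_map.1 hdash
      exact digitChar_ne_dash x (Nat.digits_lt_base (by norm_num) hx) hxc
  · have hnc : PySem.Int.toChars n = Nat.toDigits 10 n.toNat := by
      simp [PySem.Int.toChars, hn]
    rw [hnc, hvc] at h
    have := toDigits_inj _ _ h
    omega

lemma toChars_ne_nil (n : Int) : PySem.Int.toChars n ≠ [] := by
  by_cases hn : n < 0
  · simp [PySem.Int.toChars, hn]
  · simp only [PySem.Int.toChars, if_neg hn]
    rw [toDigits_repr]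
    split_ifs with h
    · simp
    · simp only [ne_eq, List.reverse_eq_nil_iff, List.map_eq_nil_iff]
      exact Nat.digits_ne_nil_iff_ne_zero.2 h

lemma B_char (n : Int) : incremental_alt n = true ↔ n ∈ S := by
  constructor
  · intro h
    rw [incremental_alt, PySem.Str.isIn_iff_infix, PySem.Int.toList_toStr] at h
    obtain ⟨t, hpre, hsuf⟩ := List.infix_iff_prefix_suffix.1 h
    have hmem : PySem.Int.toChars n ∈ ("1234567890".toList).tails.flatMap List.inits :=
      List.mem_flatMap.2 ⟨t, (List.mem_tails _ _).2 hsuf, (List.mem_inits _ _).2 hpre⟩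
    have hsub : ∀ x ∈ ("1234567890".toList).tails.flatMap List.inits,
        x = [] ∨ x ∈ S.map PySem.Int.toChars := by decide
    rcases hsub _ hmem with hnil | hmem2
    · exact absurd hnil (toChars_ne_nil n)
    · obtain ⟨v, hv, heq⟩ := List.mem_map.1 hmem2
      have hvpos : (0 : Int) ≤ v := by
        have hall : ∀ x ∈ S, (0 : Int) ≤ x := by decide
        exact hall v hv
      have := toChars_inv n v hvpos heq.symm
      rwa [this]
  · intro h
    simp only [S] at h
    fin_cases h <;> decide

-- ===== VERDICT (by name: the statement is the Claim_ definition above) =====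
theorem incremental_spec : Claim_equal_incremental := by
  intro n _
  unfold Spec_incremental
  cases hA : incremental n
  · cases hB : incremental_alt n
    · rfl
    · exact absurd ((A_char n).2 ((B_char n).1 hB)) (by simp [hA])
  · exact ((B_char n).2 ((A_char n).1 hA)).symm
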